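-- pv_equiv track=rewrite | github.com/SChandrasekhar96/AI-Resume-Extractor | extract3.py | extract_education_section
-- ===== SOURCE A (Python) =====
-- def extract_education_section(text):
--     lines = text.split('\n')
--     education_section = []
--     capture = False
--     edu_keywords = ['education', 'academic background']
--     stop_keywords = ['experience', 'projects', 'skills', 'certifications', 'languages']
--
--     for line in lines:
--         lower_line = line.lower().strip()
--         if not capture and any(k in lower_line for k in edu_keywords) and len(lower_line) <= 60:
--             capture = True
--             continue
--         if capture:
--             if any(stop in lower_line for stop in stop_keywords) and len(lower_line) <= 60:
--                 break
--             education_section.append(line.strip())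
--     return "\n".join(education_section).strip() if education_section else "Education section not found"
-- ===== SOURCE B (Python) =====
-- def extract_education_section(text):
--     lines = text.split('\n')
--     norm = [ln.lower().strip() for ln in lines]
--     is_edu = [any(k in ll for k in ('education', 'academic background')) and len(ll) <= 60
--               for ll in norm]
--     is_stop = [any(k in ll for k in ('experience', 'projects', 'skills', 'certifications', 'languages')) and len(ll) <= 60
--                for ll in norm]
--     if True not in is_edu:
--         return "Education section not found"
--     start = is_edu.index(True) + 1
--     tail = is_stop[start:]
--     stop = start + tail.index(True) if True in tail else len(lines)
--     if stop == start:
--         return "Education section not found"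
--     return "\n".join(ln.strip() for ln in lines[start:stop]).strip()
-- ===== Notes on version B (the rewrite author's own statement) =====
-- stated objective: alternative
-- what changed: Replaces A's single flag-driven loop with a mask-and-index formulation: two boolean mask lists (header/stop per line) are built by comprehensions, the section boundaries are computed with .index() and slicing, and the region lines[start:stop] is stripped and joined; no capture flag or break-driven loop remains.
import Mathlib
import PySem

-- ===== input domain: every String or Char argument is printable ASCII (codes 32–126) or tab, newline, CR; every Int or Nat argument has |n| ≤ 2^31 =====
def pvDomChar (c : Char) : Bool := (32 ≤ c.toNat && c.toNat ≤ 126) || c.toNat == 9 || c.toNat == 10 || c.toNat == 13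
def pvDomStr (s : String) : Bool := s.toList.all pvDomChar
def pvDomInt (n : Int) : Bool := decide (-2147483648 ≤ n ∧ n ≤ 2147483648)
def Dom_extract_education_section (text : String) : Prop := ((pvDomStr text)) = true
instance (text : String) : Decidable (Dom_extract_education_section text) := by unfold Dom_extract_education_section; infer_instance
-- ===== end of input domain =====

-- B replaces A's capture-flag loop by boolean masks plus index/slice arithmetic: an alternative decomposition, same cost.

-- ===== PORT A =====
def pvEduKeywords : List String := ["education", "academic background"]
def pvStopKeywords : List String := ["experience", "projects", "skills", "certifications", "languages"]

-- A's single for-loop with the `capture` flag; `break` returns the accumulator.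
def pvALoop : List String → List String → Bool → List String
  | [], acc, _ => acc
  | line :: rest, acc, capture =>
    let ll := PySem.Str.strip (PySem.Str.lower line)
    if (!capture) && (pvEduKeywords.any (fun k => PySem.Str.isIn k ll))
        && decide (PySem.Str.len ll ≤ 60) then
      pvALoop rest acc true
    else if capture then
      if (pvStopKeywords.any (fun s => PySem.Str.isIn s ll))
          && decide (PySem.Str.len ll ≤ 60) then acc
      else pvALoop rest (acc ++ [PySem.Str.strip line]) capture
    else pvALoop rest acc capture

def extract_education_section (text : String) : String :=
  let lines := (PySem.Str.split? text "\n").getD []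
  let sec := pvALoop lines [] false
  if sec.isEmpty then "Education section not found"
  else PySem.Str.strip (PySem.Str.join "\n" sec)

-- ===== PORT B =====
-- the two comprehension bodies of Source B (applied to an already-normalised line `ll`)
def pvIsEdu (ll : String) : Bool :=
  (pvEduKeywords.any fun k => PySem.Str.isIn k ll) && decide (PySem.Str.len ll ≤ 60)
def pvIsStop (ll : String) : Bool :=
  (pvStopKeywords.any fun s => PySem.Str.isIn s ll) && decide (PySem.Str.len ll ≤ 60)

-- Source B: masks by comprehension, then .index() + slicing.  The slices is_stop[start:]
-- and lines[start:stop] have nonnegative in-range bounds, so drop/take is exact.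
def extract_education_section_alt (text : String) : String :=
  let lines := (PySem.Str.split? text "\n").getD []
  let norm := lines.map (fun ln => PySem.Str.strip (PySem.Str.lower ln))
  let isEdu := norm.map pvIsEdu
  let isStop := norm.map pvIsStop
  match PySem.List.index? isEdu true with
  | none => "Education section not found"
  | some i =>
    let start := i + 1
    let tail := isStop.drop start
    let stop := match PySem.List.index? tail true with
      | some j => start + j
      | none => lines.length
    if stop = start then "Education section not found"
    else PySem.Str.strip (PySem.Str.join "\n"
      (((lines.drop start).take (stop - start)).map PySem.Str.strip))

-- ===== PRECONDITION & SPEC =====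
def Spec_extract_education_section (text : String) (out : String) : Prop := out = extract_education_section_alt text
instance (text : String) (out : String) : Decidable (Spec_extract_education_section text out) := by unfold Spec_extract_education_section; infer_instance

-- ===== CLAIM =====
def Claim_equal_extract_education_section : Prop := ∀ (text : String), Dom_extract_education_section text → Spec_extract_education_section text (extract_education_section text)

-- ===== LEMMAS AND PROOFS =====

-- predicates on a raw line (normalisation fused), used only by the proofs
def pvPE (line : String) : Bool := pvIsEdu (PySem.Str.strip (PySem.Str.lower line))
def pvPS (line : String) : Bool := pvIsStop (PySem.Str.strip (PySem.Str.lower line))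

-- intermediate description of A's loop (find header, then collect to stop)
def pvBFind : List String → Option (List String)
  | [] => none
  | line :: rest => if pvPE line then some rest else pvBFind rest

def pvBCollect : List String → List String
  | [] => []
  | line :: rest =>
    if pvPS line then [] else PySem.Str.strip line :: pvBCollect rest

-- With capture already set, A's loop appends exactly the collect-to-stop list.
theorem pvALoop_true (lines acc : List String) :
    pvALoop lines acc true = acc ++ pvBCollect lines := by
  induction lines generalizing acc with
  | nil => simp [pvALoop, pvBCollect]
  | cons line rest ih =>
    simp only [pvALoop, pvBCollect, pvPS, pvIsStop, Bool.not_true, Bool.false_and,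
      Bool.false_eq_true, if_false, if_true]
    split
    · simp
    · rw [ih]; simp

-- Before capture, A's loop is the header search followed by the collection.
theorem pvALoop_false (lines : List String) :
    pvALoop lines [] false =
      (match pvBFind lines with
       | none => []
       | some rest => pvBCollect rest) := by
  induction lines with
  | nil => simp [pvALoop, pvBFind]
  | cons line rest ih =>
    simp only [pvALoop, pvBFind, pvPE, pvIsEdu, Bool.not_false, Bool.true_and]
    split
    · rw [pvALoop_true]; simp
    · exact ih

-- B's phase-1 mask search is the header search.
theorem pvBFind_eq (lines : List String) :
    pvBFind lines = (PySem.List.index? (lines.map pvPE) true).map (fun i => lines.drop (i + 1)) := by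
  induction lines with
  | nil => simp [pvBFind, PySem.List.index?]
  | cons line rest ih =>
    by_cases h : pvPE line = true
    · rw [List.map_cons, h, PySem.List.index?_cons_self]
      simp [pvBFind, h]
    · have hf : pvPE line = false := by simpa using h
      rw [List.map_cons, hf, PySem.List.index?_cons_of_ne _ (by simp)]
      simp only [pvBFind, hf, Bool.false_eq_true, if_false, ih, Option.map_map]
      cases PySem.List.index? (rest.map pvPE) true <;> simp

-- B's phase-2 mask search + slice is the collect-to-stop list.
theorem pvBCollect_eq (rest : List String) :
    pvBCollect rest =
      (rest.take (match PySem.List.index? (rest.map pvPS) true with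
                  | some j => j | none => rest.length)).map PySem.Str.strip := by
  induction rest with
  | nil => simp [pvBCollect, PySem.List.index?]
  | cons line xs ih =>
    by_cases h : pvPS line = true
    · rw [List.map_cons, h, PySem.List.index?_cons_self]
      simp [pvBCollect, h]
    · have hf : pvPS line = false := by simpa using h
      rw [pvBCollect]
      simp only [hf, Bool.false_eq_true, if_false]
      rw [List.map_cons, hf, PySem.List.index?_cons_of_ne _ (by simp)]
      cases hx : PySem.List.index? (xs.map pvPS) true with
      | none => simp only [Option.map_none]; rw [ih, hx]; simp
      | some j => simp only [Option.map_some]; rw [ih, hx]; simp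

theorem index?_lt {α : Type} [DecidableEq α] (xs : List α) (v : α) (i : Nat)
    (h : PySem.List.index? xs v = some i) : i < xs.length := by
  obtain ⟨hk, _, _⟩ := PySem.List.getElem_of_index?_eq_some h
  exact hk

-- ===== VERDICT =====
theorem extract_education_section_spec : Claim_equal_extract_education_section := by
  intro text _
  show _ = _
  unfold extract_education_section extract_education_section_alt
  simp only [pvALoop_false]
  set lines := (PySem.Str.split? text "\n").getD [] with hlines
  have hmapE : List.map pvIsEdu (lines.map (fun ln => PySem.Str.strip (PySem.Str.lower ln)))
      = lines.map pvPE := by simp [pvPE, Function.comp]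
  have hmapS : List.map pvIsStop (lines.map (fun ln => PySem.Str.strip (PySem.Str.lower ln)))
      = lines.map pvPS := by simp [pvPS, Function.comp]
  rw [pvBFind_eq, hmapE, hmapS]
  cases hE : PySem.List.index? (lines.map pvPE) true with
  | none => simp
  | some i =>
    have hi : i < lines.length := by
      have := index?_lt _ _ _ hE; simpa using this
    simp only [Option.map_some]
    have hdrop : (lines.map pvPS).drop (i + 1) = (lines.drop (i + 1)).map pvPS :=
      (List.map_drop ..).symm
    rw [hdrop, pvBCollect_eq]
    have hlen : (lines.drop (i + 1)).length = lines.length - (i + 1) := by simp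
    cases hS : PySem.List.index? ((lines.drop (i + 1)).map pvPS) true with
    | none =>
      simp only
      by_cases hz : lines.length = i + 1
      · have hnil : lines.drop (i + 1) = [] := by
          apply List.eq_nil_of_length_eq_zero; omega
        simp [hz, hnil]
      · rw [if_neg hz, hlen]
        have : (lines.drop (i+1)).take (lines.length - (i+1)) = lines.drop (i+1) := by
          rw [← hlen]; exact List.take_length ..
        rw [this]
        have : ((lines.drop (i+1)).map PySem.Str.strip).isEmpty = false := by
          simp; omega
        rw [this]; simp
    | some j =>
      have hjne : lines.drop (i + 1) ≠ [] := by
        intro hc; rw [hc] at hS; simp [PySem.List.index?] at hS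
      simp only
      by_cases hj0 : i + 1 + j = i + 1
      · have : j = 0 := by omega
        subst this
        simp [hj0]
      · rw [if_neg hj0]
        have hjpos : 0 < j := by omega
        have : i + 1 + j - (i + 1) = j := by omega
        rw [this]
        have hlp : 0 < (List.drop (i+1) lines).length := List.length_pos_of_ne_nil hjne
        have : (((lines.drop (i+1)).take j).map PySem.Str.strip).isEmpty = false := by
          simp; omega
        rw [this]; simp
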